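-- pv_equiv track=rewrite | github.com/emiliaheikonenkoulu/3.1 | postinumerot.py | ryhmittele_toimipaikkoihin
-- ===== SOURCE A (Python) =====
-- def ryhmittele_toimipaikkoihin(postinumerot):
--     toimipaikat = {}
--     for numero, paikka in postinumerot.items():
--         if paikka in toimipaikat:
--             toimipaikat[paikka].append(numero)
--         else:
--             toimipaikat[paikka] = [numero]
--
--     return toimipaikat
-- ===== SOURCE B (Python) =====
-- def ryhmittele_toimipaikkoihin(postinumerot):
--     items = list(postinumerot.items())
--     paikat = dict.fromkeys(paikka for _, paikka in items)
--     return {p: [numero for numero, paikka in items if paikka == p]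
--             for p in paikat}
-- ===== Notes on version B (the rewrite author's own statement) =====
-- stated objective: alternative
-- what changed: Instead of one pass that mutates a growing dict of lists, B first computes the distinct place names in first-seen order with dict.fromkeys and then builds the result by a dict comprehension whose inner comprehension scans the items once per place.
import Mathlib
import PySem

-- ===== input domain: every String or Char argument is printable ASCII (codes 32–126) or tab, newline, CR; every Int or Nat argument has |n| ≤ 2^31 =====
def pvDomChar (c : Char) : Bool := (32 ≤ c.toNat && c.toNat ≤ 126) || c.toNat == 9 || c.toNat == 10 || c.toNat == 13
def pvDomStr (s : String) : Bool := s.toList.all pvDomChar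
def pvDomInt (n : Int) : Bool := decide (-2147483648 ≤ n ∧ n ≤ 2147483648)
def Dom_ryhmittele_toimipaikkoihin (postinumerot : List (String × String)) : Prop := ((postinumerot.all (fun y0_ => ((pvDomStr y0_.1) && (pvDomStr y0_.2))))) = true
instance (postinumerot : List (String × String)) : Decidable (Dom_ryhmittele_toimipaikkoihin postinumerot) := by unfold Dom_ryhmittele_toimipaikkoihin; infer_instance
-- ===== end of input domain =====

-- B replaces A's single mutating-dict pass by dict.fromkeys over the place names followed by a
-- per-place filtering comprehension: an alternative decomposition of similar cost, not claimed faster.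

-- ===== PORT A =====
-- for numero, paikka in postinumerot.items(): append to toimipaikat[paikka] if present, else create [numero]
def ryhmittele_toimipaikkoihin (postinumerot : List (String × String)) : List (String × List String) :=
  (postinumerot.foldl (fun t np =>
      if t.contains np.2 = true then t.modify np.2 [] (fun l => l ++ [np.1])
      else t.insert np.2 [np.1])
    (PySem.Dict.empty)).items

-- ===== PORT B =====
-- distinct place names in first-seen order (dict.fromkeys), then one filtering pass per place
def ryhmittele_toimipaikkoihin_alt (postinumerot : List (String × String)) : List (String × List String) :=
  (PySem.List.dedup (postinumerot.map (fun np => np.2))).map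
    (fun p => (p, (postinumerot.filter (fun np => np.2 == p)).map (fun np => np.1)))

-- ===== PRECONDITION & SPEC =====
def Spec_ryhmittele_toimipaikkoihin (postinumerot : List (String × String)) (out : List (String × List String)) : Prop := out = ryhmittele_toimipaikkoihin_alt postinumerot
instance (postinumerot : List (String × String)) (out : List (String × List String)) : Decidable (Spec_ryhmittele_toimipaikkoihin postinumerot out) := by unfold Spec_ryhmittele_toimipaikkoihin; infer_instance

-- ===== CLAIM (what is proved, stated in full; the proofs are below) =====
def Claim_equal_ryhmittele_toimipaikkoihin : Prop := ∀ (postinumerot : List (String × String)), Dom_ryhmittele_toimipaikkoihin postinumerot → Spec_ryhmittele_toimipaikkoihin postinumerot (ryhmittele_toimipaikkoihin postinumerot)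

-- ===== LEMMAS AND PROOFS =====

-- A's branchy loop body is exactly Dict.modify (append to the key's list, default [])
theorem pv_step_eq :
    (fun (t : PySem.Dict String (List String)) (np : String × String) =>
      if t.contains np.2 = true then t.modify np.2 [] (fun l => l ++ [np.1])
      else t.insert np.2 [np.1])
      = fun t np => t.modify np.2 [] (fun l => l ++ [np.1]) := by
  funext t np
  by_cases h : t.contains np.2 = true
  · simp [h]
  · have hg : t.getD np.2 [] = [] := PySem.Dict.getD_of_not_contains t _ (by simpa using h)
    simp [h, PySem.Dict.modify, hg]

theorem pv_equal (ps : List (String × String)) :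
    ryhmittele_toimipaikkoihin ps = ryhmittele_toimipaikkoihin_alt ps := by
  unfold ryhmittele_toimipaikkoihin ryhmittele_toimipaikkoihin_alt
  rw [pv_step_eq]
  set d := ps.foldl (fun t np => t.modify np.2 [] (fun l => l ++ [np.1])) PySem.Dict.empty with hd
  have hnodup : d.keys.Nodup := by
    rw [hd]
    exact PySem.Dict.nodup_keys_foldl_modify_key ps Prod.snd [] (fun t np l => l ++ [np.1]) _
      (by simp [PySem.Dict.keys_empty])
  have hkeys : d.keys = PySem.List.dedup (ps.map (fun np => np.2)) := by
    rw [hd, PySem.Dict.keys_foldl_modify_key]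
    simp [PySem.Dict.keys_empty, PySem.Set.update_nil_left]
  have hgetD : ∀ c, d.getD c [] = (ps.filter (fun np => np.2 == c)).map (fun np => np.1) := by
    intro c
    have hswap : d = (ps.map Prod.swap).foldl
        (fun t p => t.modify p.1 [] (fun l => l ++ [p.2])) PySem.Dict.empty := by
      rw [hd, List.foldl_map]
      simp
    rw [hswap, PySem.Dict.getD_foldl_modify_append]
    simp [PySem.Dict.getD_empty, List.filter_map, Function.comp_def, Prod.swap]
  rw [PySem.Dict.items_eq_map_keys d hnodup [], hkeys]
  exact List.map_congr_left (fun k _ => by rw [hgetD k])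

-- ===== VERDICT (by name: the statement is the Claim_ definition above) =====
theorem ryhmittele_toimipaikkoihin_spec : Claim_equal_ryhmittele_toimipaikkoihin := by
  intro ps _
  exact pv_equal ps
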